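-- pv_equiv track=rewrite | github.com/PratikSathe/QAOA_approxratio_landscape | methods.py | get_size_dist
-- ===== SOURCE A (Python) =====
-- def get_size_dist(counts, sizes, optimal_size):
--     """ For given measurement outcomes, i.e. combinations of counts and sizes, return counts corresponding to each cut size.
--     Args:
--         counts (list): List of integers, denoting number of times each cut was measured
--         sizes (list): List of integers. Cut size corresponding to each measured cut
--         optimal_size (int) : Max cut size for the graph
--     Returns:
--         full_counts_list (list) : Number of times each size was obtained
--         full_size_list (list) : List of all possible sizes (0,1,...,optimal_size)
--     """
--     unique_sizes = list(set(sizes))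
--     unique_counts = [0] * len(unique_sizes)
--
--     for i, size in enumerate(unique_sizes):
--         # corresp_counts = [counts[ind] for ind,s in enumerate(sizes) if s == size]
--         corresp_counts = [c for (c,s) in zip(counts, sizes) if s == size]
--         unique_counts[i] = sum(corresp_counts)
--
--     # Make sure that the scores are in non-decreasing order
--     s_and_c_list = [[a,b] for (a,b) in zip(unique_sizes, unique_counts)] #size and cut list
--     s_and_c_list = sorted(s_and_c_list, key = lambda x : x[0]) # sort according to sizes
--     unique_sizes = [x[0] for x in s_and_c_list]
--     unique_counts = [x[1] for x in s_and_c_list]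
--
--     full_size_list = list(range(optimal_size + 1))
--     full_counts_list = [unique_counts[unique_sizes.index(s)] if s in unique_sizes else 0 for s in full_size_list]
--
--     return full_counts_list, full_size_list
-- ===== SOURCE B (Python) =====
-- def get_size_dist(counts, sizes, optimal_size):
--     """Single-pass dict accumulation instead of per-unique-size rescans."""
--     acc = {}
--     for c, s in zip(counts, sizes):
--         acc[s] = acc.get(s, 0) + c
--     full_size_list = list(range(optimal_size + 1))
--     full_counts_list = [acc.get(s, 0) for s in full_size_list]
--     return full_counts_list, full_size_list
-- ===== Notes on version B (the rewrite author's own statement) =====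
-- stated objective: faster
-- what changed: Replaces the per-unique-size rescan of the whole measurement list plus sort plus per-size list.index lookups by a single pass that accumulates counts into a dict keyed by size, then reads the dict directly for each size in 0..optimal_size.
import Mathlib
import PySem

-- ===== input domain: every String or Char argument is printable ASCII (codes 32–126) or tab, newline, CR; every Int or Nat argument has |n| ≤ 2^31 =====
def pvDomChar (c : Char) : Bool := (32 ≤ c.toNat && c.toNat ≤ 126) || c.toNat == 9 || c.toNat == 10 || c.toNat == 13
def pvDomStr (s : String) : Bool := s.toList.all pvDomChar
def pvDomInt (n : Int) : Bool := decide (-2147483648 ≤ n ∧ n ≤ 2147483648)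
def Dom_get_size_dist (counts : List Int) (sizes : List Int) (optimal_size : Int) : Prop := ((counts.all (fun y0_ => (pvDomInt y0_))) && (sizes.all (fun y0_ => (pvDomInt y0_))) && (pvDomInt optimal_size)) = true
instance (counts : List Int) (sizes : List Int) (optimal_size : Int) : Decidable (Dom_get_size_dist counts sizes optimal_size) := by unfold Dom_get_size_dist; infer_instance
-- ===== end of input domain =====

-- B replaces A's per-unique-size rescans, sort and list.index lookups by one
-- dict-accumulation pass followed by direct lookups (objective: faster).

-- ===== PORT A =====
def get_size_dist (counts : List Int) (sizes : List Int) (optimal_size : Int) : List Int × List Int :=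
  let unique_sizes := PySem.Set.ofList sizes
  -- for i, size in enumerate(unique_sizes): unique_counts[i] = sum([c for (c,s) in zip(counts,sizes) if s == size])
  let unique_counts := unique_sizes.map (fun size =>
      (((counts.zip sizes).filter (fun p => p.2 == size)).map Prod.fst).sum)
  let s_and_c_list := unique_sizes.zip unique_counts
  let s_and_c_list := PySem.List.sorted s_and_c_list (fun x => x.1) false
  let unique_sizes := s_and_c_list.map Prod.fst
  let unique_counts := s_and_c_list.map Prod.snd
  let full_size_list := PySem.List.pyRange 0 (optimal_size + 1) 1
  let full_counts_list := full_size_list.map (fun s =>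
      if unique_sizes.contains s then
        -- unique_counts[unique_sizes.index(s)] — the index is in range, so pyGet? is some
        match PySem.List.index? unique_sizes s with
        | some i => (PySem.List.pyGet? unique_counts (i : Int)).getD 0
        | none => 0
      else 0)
  (full_counts_list, full_size_list)

-- ===== PORT B =====
def get_size_dist_alt (counts : List Int) (sizes : List Int) (optimal_size : Int) : List Int × List Int :=
  let acc := (counts.zip sizes).foldl
      (fun (d : PySem.Dict Int Int) p => d.insert p.2 (d.getD p.2 0 + p.1)) PySem.Dict.empty
  let full_size_list := PySem.List.pyRange 0 (optimal_size + 1) 1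
  let full_counts_list := full_size_list.map (fun s => acc.getD s 0)
  (full_counts_list, full_size_list)

-- ===== PRECONDITION & SPEC =====
def Spec_get_size_dist (counts : List Int) (sizes : List Int) (optimal_size : Int) (out : List Int × List Int) : Prop := out = get_size_dist_alt counts sizes optimal_size
instance (counts : List Int) (sizes : List Int) (optimal_size : Int) (out : List Int × List Int) : Decidable (Spec_get_size_dist counts sizes optimal_size out) := by unfold Spec_get_size_dist; infer_instance

-- ===== CLAIM (what is proved, stated in full; the proofs are below) =====
def Claim_equal_get_size_dist : Prop := ∀ (counts : List Int) (sizes : List Int) (optimal_size : Int), Dom_get_size_dist counts sizes optimal_size → Spec_get_size_dist counts sizes optimal_size (get_size_dist counts sizes optimal_size)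

-- ===== LEMMAS AND PROOFS =====

-- the common value: total count measured at cut size s
def pvTotal (counts sizes : List Int) (s : Int) : Int :=
  (((counts.zip sizes).filter (fun p => p.2 == s)).map Prod.fst).sum

-- B side: the dict fold accumulates exactly pvTotal
theorem pv_fold_getD (l : List (Int × Int)) (d : PySem.Dict Int Int) (s : Int) :
    (l.foldl (fun (d : PySem.Dict Int Int) p => d.insert p.2 (d.getD p.2 0 + p.1)) d).getD s 0
      = d.getD s 0 + ((l.filter (fun p => p.2 == s)).map Prod.fst).sum := by
  induction l generalizing d with
  | nil => simp
  | cons p t ih =>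
    simp only [List.foldl_cons, ih, List.filter_cons]
    by_cases h : p.2 = s
    · simp [h]
      ring
    · have hbe : (p.2 == s) = false := by simpa using h
      simp only [hbe, Bool.false_eq_true, if_false, PySem.Dict.getD_insert]
      rw [if_neg (fun heq => h heq.symm)]

-- zip l (l.map f) = l.map (fun a => (a, f a))
theorem pv_zip_map (l : List Int) (f : Int → Int) :
    l.zip (l.map f) = l.map (fun a => (a, f a)) := by
  induction l with
  | nil => rfl
  | cons x t ih => simp [ih]

-- lookup by index? in a map
theorem pv_index_lookup (w : List Int) (f : Int → Int) (s : Int) (hs : s ∈ w) :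
    (match PySem.List.index? w s with
      | some i => (PySem.List.pyGet? (w.map f) (i : Int)).getD 0
      | none => 0) = f s := by
  obtain ⟨i, hi⟩ : ∃ i, PySem.List.index? w s = some i := by
    simpa [Option.isSome_iff_exists] using (PySem.List.index?_isSome_iff (xs := w) (v := s)).2 hs
  obtain ⟨hlt, hws, -⟩ := PySem.List.getElem_of_index?_eq_some hi
  rw [hi]
  have : PySem.List.pyGet? (w.map f) (i : Int) = some ((w.map f)[i]'(by simpa using hlt)) := by
    rw [PySem.List.pyGet?_natCast]
    simp [hlt]
  simp [this, hws]

-- A's per-size value equals pvTotal for every s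
theorem pv_A_val (counts sizes : List Int) (s : Int) :
    (let unique_sizes := PySem.Set.ofList sizes
     let unique_counts := unique_sizes.map (fun size =>
        (((counts.zip sizes).filter (fun p => p.2 == size)).map Prod.fst).sum)
     let sc := PySem.List.sorted (unique_sizes.zip unique_counts) (fun x => x.1) false
     if (sc.map Prod.fst).contains s then
        match PySem.List.index? (sc.map Prod.fst) s with
        | some i => (PySem.List.pyGet? (sc.map Prod.snd) (i : Int)).getD 0
        | none => 0
      else 0) = pvTotal counts sizes s := by
  simp only
  set u := PySem.Set.ofList sizes with hu
  set g := fun size => (((counts.zip sizes).filter (fun p => p.2 == size)).map Prod.fst).sum with hg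
  have hzip : u.zip (u.map g) = u.map (fun a => (a, g a)) := pv_zip_map u g
  set sc := PySem.List.sorted (u.zip (u.map g)) (fun x => x.1) false with hsc
  have hperm : sc.Perm (u.map (fun a => (a, g a))) := by
    rw [hsc, hzip]; exact PySem.List.sorted_perm _ _ _
  have hmemshape : ∀ p ∈ sc, p.2 = g p.1 := by
    intro p hp
    have := hperm.mem_iff.1 hp
    simp only [List.mem_map] at this
    obtain ⟨a, -, rfl⟩ := this
    rfl
  have hsnd : sc.map Prod.snd = (sc.map Prod.fst).map g := by
    rw [List.map_map]
    exact List.map_congr_left (fun p hp => (hmemshape p hp).symm ▸ rfl)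
  by_cases hmem : s ∈ sc.map Prod.fst
  · have hcont : (sc.map Prod.fst).contains s = true := by simpa using hmem
    rw [if_pos hcont, hsnd, pv_index_lookup _ g s hmem]
    rfl
  · have hcont : ¬ ((sc.map Prod.fst).contains s = true) := by simpa using hmem
    rw [if_neg hcont]
    -- s not among the unique sizes ⇒ s ∉ sizes ⇒ the filter is empty
    have hns : s ∉ sizes := by
      intro hsz
      apply hmem
      have : s ∈ u := by rw [hu]; exact (PySem.Set.mem_ofList sizes s).2 hsz
      have : (s, g s) ∈ sc := hperm.mem_iff.2 (List.mem_map.2 ⟨s, this, rfl⟩)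
      exact List.mem_map.2 ⟨(s, g s), this, rfl⟩
    have : (counts.zip sizes).filter (fun p => p.2 == s) = [] := by
      rw [List.filter_eq_nil_iff]
      intro p hp
      have : p.2 ∈ sizes := (List.of_mem_zip hp).2
      simp only [beq_iff_eq]
      exact fun h => hns (h ▸ this)
    simp [pvTotal, this]

-- ===== VERDICT (by name: the statement is the Claim_ definition above) =====
theorem get_size_dist_spec : Claim_equal_get_size_dist := by
  intro counts sizes optimal_size _
  unfold Spec_get_size_dist get_size_dist get_size_dist_alt
  simp only
  refine Prod.ext ?_ rfl
  apply List.map_congr_left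
  intro s _
  rw [pv_A_val counts sizes s, pv_fold_getD]
  simp [pvTotal, PySem.Dict.empty, PySem.Dict.getD, PySem.Dict.get?]
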